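-- pv_equiv track=rewrite | github.com/Minki-Trader/Project_Obsidian_Prime_v2 | foundation/pipelines/materialize_fpmarkets_v2_tiered_readiness_scorecard.py | serialize_pipe_tokens
-- ===== SOURCE A (Python) =====
-- from typing import Iterable, Sequence
--
-- def serialize_pipe_tokens(tokens: Iterable[str], order: Sequence[str]) -> str:
--     seen = set()
--     unique_tokens = []
--     for token in tokens:
--         if token and token not in seen:
--             seen.add(token)
--             unique_tokens.append(token)
--     order_index = {token: index for index, token in enumerate(order)}
--     unique_tokens.sort(key=lambda token: (order_index.get(token, len(order)), token))
--     return "|".join(unique_tokens)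
-- ===== SOURCE B (Python) =====
-- def serialize_pipe_tokens(tokens, order):
--     present = {t for t in tokens if t}
--     seen_o = set()
--     known_rev = []
--     for t in reversed(order):
--         if t not in seen_o:
--             seen_o.add(t)
--             if t in present:
--                 known_rev.append(t)
--     known = known_rev[::-1]
--     unknowns = sorted(present - seen_o)
--     return "|".join(known + unknowns)
-- ===== Notes on version B (the rewrite author's own statement) =====
-- stated objective: alternative
-- what changed: Replaces the composite-key (order index, name) sort of all unique tokens by an order-driven reverse scan that emits known tokens at their last occurrence in `order`, plus a plain alphabetical sort of only the unknown tokens.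
import Mathlib
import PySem

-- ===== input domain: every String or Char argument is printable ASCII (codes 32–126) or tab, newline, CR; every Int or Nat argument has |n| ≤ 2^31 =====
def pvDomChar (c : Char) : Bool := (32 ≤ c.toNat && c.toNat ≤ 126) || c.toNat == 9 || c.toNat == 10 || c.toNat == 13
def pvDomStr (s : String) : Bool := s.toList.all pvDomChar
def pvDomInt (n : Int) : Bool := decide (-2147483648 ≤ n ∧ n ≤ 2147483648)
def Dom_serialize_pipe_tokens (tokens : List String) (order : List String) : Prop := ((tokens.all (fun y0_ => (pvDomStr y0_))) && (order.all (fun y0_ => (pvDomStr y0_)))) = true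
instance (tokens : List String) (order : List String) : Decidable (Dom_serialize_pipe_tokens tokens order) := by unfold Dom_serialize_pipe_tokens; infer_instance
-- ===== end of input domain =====

-- B replaces A's composite-key (order-index, name) sort of all unique tokens by a reverse scan of
-- `order` (emitting known tokens at their last occurrence) plus an alphabetical sort of the unknowns.

-- ===== PORT A =====
def serialize_pipe_tokens (tokens : List String) (order : List String) : String :=
  -- seen = set(); unique_tokens = []; for token in tokens: if token and token not in seen: ...
  let st := tokens.foldl (fun (p : PySem.Set String × List String) token =>
      if !(token == "") && !(PySem.Set.contains p.1 token) then
        (PySem.Set.add p.1 token, p.2 ++ [token])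
      else p) (PySem.Set.empty, [])
  -- order_index = {token: index for index, token in enumerate(order)}
  let order_index := (PySem.List.enumerate order 0).foldl
      (fun d (p : Int × String) => d.insert p.2 p.1) PySem.Dict.empty
  -- unique_tokens.sort(key=lambda token: (order_index.get(token, len(order)), token))
  let sortedU := PySem.List.sorted2 st.2
      (fun t => order_index.getD t (order.length : Int)) (fun t => t) false
  PySem.Str.join "|" sortedU

-- ===== PORT B =====
def serialize_pipe_tokens_alt (tokens : List String) (order : List String) : String :=
  -- present = {t for t in tokens if t}
  let present : PySem.Set String := PySem.Set.ofList (tokens.filter (fun t => !(t == "")))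
  -- reverse scan of order, collecting last occurrences that are present
  let st := order.reverse.foldl (fun (p : PySem.Set String × List String) t =>
      if !(PySem.Set.contains p.1 t) then
        (PySem.Set.add p.1 t,
         if PySem.Set.contains present t then p.2 ++ [t] else p.2)
      else p) (PySem.Set.empty, [])
  let known := st.2.reverse
  -- unknowns = sorted(present - seen_o)
  let unknowns := PySem.List.sorted (PySem.Set.diff present st.1) (fun x => x) false
  PySem.Str.join "|" (known ++ unknowns)

-- ===== PRECONDITION & SPEC =====
def Spec_serialize_pipe_tokens (tokens : List String) (order : List String) (out : String) : Prop := out = serialize_pipe_tokens_alt tokens order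
instance (tokens : List String) (order : List String) (out : String) : Decidable (Spec_serialize_pipe_tokens tokens order out) := by unfold Spec_serialize_pipe_tokens; infer_instance

-- ===== CLAIM (what is proved, stated in full; the proofs are below) =====
def Claim_equal_serialize_pipe_tokens : Prop := ∀ (tokens : List String) (order : List String), Dom_serialize_pipe_tokens tokens order → Spec_serialize_pipe_tokens tokens order (serialize_pipe_tokens tokens order)

-- ===== LEMMAS AND PROOFS =====

-- dedup-relative-to-a-seen-set helper (proof only)
def pvDD (s : PySem.Set String) : List String → List String
  | [] => []
  | t :: l => if PySem.Set.contains s t then pvDD s l else t :: pvDD (PySem.Set.add s t) l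

theorem pv_mem_dd (l : List String) (s : PySem.Set String) (x : String) :
    x ∈ pvDD s l ↔ x ∈ l ∧ x ∉ s := by
  induction l generalizing s with
  | nil => simp [pvDD]
  | cons t l ih =>
    by_cases h : PySem.Set.contains s t
    · have ht : t ∈ s := by simpa [PySem.Set.contains] using h
      simp only [pvDD, if_pos h, ih, List.mem_cons]
      constructor
      · rintro ⟨hx, hxs⟩; exact ⟨Or.inr hx, hxs⟩
      · rintro ⟨hx | hx, hxs⟩
        · exact absurd (hx ▸ ht) hxs
        · exact ⟨hx, hxs⟩
    · have ht : t ∉ s := by simpa [PySem.Set.contains] using h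
      simp only [pvDD, if_neg h, List.mem_cons, ih]
      have hadd : ∀ y : String, y ∈ PySem.Set.add s t ↔ y ∈ s ∨ y = t := by
        intro y; simp [PySem.Set.add, PySem.Set.contains, ht, or_comm]
      constructor
      · rintro (rfl | ⟨hx, hxs⟩)
        · exact ⟨Or.inl rfl, ht⟩
        · exact ⟨Or.inr hx, fun hy => hxs ((hadd x).2 (Or.inl hy))⟩
      · rintro ⟨rfl | hx, hxs⟩
        · exact Or.inl rfl
        · by_cases hxt : x = t
          · exact Or.inl hxt
          · exact Or.inr ⟨hx, fun hy => hxt (((hadd x).1 hy).resolve_left (fun c => hxs c))⟩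

theorem pv_nodup_dd (l : List String) (s : PySem.Set String) : (pvDD s l).Nodup := by
  induction l generalizing s with
  | nil => simp [pvDD]
  | cons t l ih =>
    by_cases h : PySem.Set.contains s t
    · simp only [pvDD, if_pos h]; exact ih s
    · simp only [pvDD, if_neg h, List.nodup_cons]
      refine ⟨fun hmem => ?_, ih _⟩
      have := (pv_mem_dd l (PySem.Set.add s t) t).1 hmem
      exact this.2 (by simp [PySem.Set.add]; split <;> simp_all [PySem.Set.contains])

theorem pv_pairwise_dd (l : List String) (s : PySem.Set String) :
    (pvDD s l).Pairwise (fun a b => l.idxOf a < l.idxOf b) := by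
  induction l generalizing s with
  | nil => simp [pvDD]
  | cons t l ih =>
    by_cases h : PySem.Set.contains s t
    · have ht : t ∈ s := by simpa [PySem.Set.contains] using h
      simp only [pvDD, if_pos h]
      refine (ih s).imp_of_mem ?_
      intro a b ha hb hab
      have ha' := (pv_mem_dd l s a).1 ha
      have hb' := (pv_mem_dd l s b).1 hb
      have hat : t ≠ a := fun e => ha'.2 (e ▸ ht)
      have hbt : t ≠ b := fun e => hb'.2 (e ▸ ht)
      rw [List.idxOf_cons_ne _ hat, List.idxOf_cons_ne _ hbt]
      omega
    · have ht : t ∉ s := by simpa [PySem.Set.contains] using h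
      have htadd : t ∈ PySem.Set.add s t := by
        simp [PySem.Set.add]; split <;> simp_all [PySem.Set.contains]
      simp only [pvDD, if_neg h]
      refine List.Pairwise.cons ?_ ?_
      · intro b hb
        have hb' := (pv_mem_dd l (PySem.Set.add s t) b).1 hb
        have hbt : t ≠ b := fun e => hb'.2 (e ▸ htadd)
        rw [List.idxOf_cons_self, List.idxOf_cons_ne _ hbt]
        omega
      · refine (ih (PySem.Set.add s t)).imp_of_mem ?_
        intro a b ha hb hab
        have ha' := (pv_mem_dd l (PySem.Set.add s t) a).1 ha
        have hb' := (pv_mem_dd l (PySem.Set.add s t) b).1 hb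
        have hat : t ≠ a := fun e => ha'.2 (e ▸ htadd)
        have hbt : t ≠ b := fun e => hb'.2 (e ▸ htadd)
        rw [List.idxOf_cons_ne _ hat, List.idxOf_cons_ne _ hbt]
        omega

theorem pv_foldl_add_eq_append_dd (l : List String) (s : PySem.Set String) :
    l.foldl PySem.Set.add s = s ++ pvDD s l := by
  induction l generalizing s with
  | nil => simp [pvDD]
  | cons t l ih =>
    by_cases h : PySem.Set.contains s t
    · simp only [pvDD, if_pos h, List.foldl_cons]
      rw [show PySem.Set.add s t = s from by
        have ht : t ∈ s := by simpa [PySem.Set.contains] using h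
        simp [PySem.Set.add, PySem.Set.contains, ht]]
      exact ih s
    · simp only [pvDD, if_neg h, List.foldl_cons]
      rw [ih (PySem.Set.add s t)]
      rw [show PySem.Set.add s t = s ++ [t] from by
        have ht : t ∉ s := by simpa [PySem.Set.contains] using h
        simp [PySem.Set.add, PySem.Set.contains, ht]]
      simp

theorem pv_ofList_eq_dd (l : List String) : PySem.Set.ofList l = pvDD PySem.Set.empty l := by
  rw [PySem.Set.ofList_eq_foldl]
  simpa [PySem.Set.empty] using pv_foldl_add_eq_append_dd l PySem.Set.empty

-- A's dedup loop in closed form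
theorem pv_A_fold (l : List String) (s : PySem.Set String) (u : List String) :
    l.foldl (fun (p : PySem.Set String × List String) token =>
      if !(token == "") && !(PySem.Set.contains p.1 token) then
        (PySem.Set.add p.1 token, p.2 ++ [token])
      else p) (s, u)
    = ((l.filter (fun t => !(t == ""))).foldl PySem.Set.add s,
       u ++ pvDD s (l.filter (fun t => !(t == "")))) := by
  induction l generalizing s u with
  | nil => simp [pvDD]
  | cons t l ih =>
    simp only [List.foldl_cons]
    by_cases h0 : (t == "") = true
    · rw [if_neg (by simp [h0]), ih s u,
        show List.filter (fun t => !(t == "")) (t :: l) = List.filter (fun t => !(t == "")) l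
          from by simp [List.filter_cons, h0]]
    · have hfil : List.filter (fun t => !(t == "")) (t :: l)
          = t :: List.filter (fun t => !(t == "")) l := by simp [List.filter_cons, h0]
      by_cases hc : PySem.Set.contains s t = true
      · have ht : t ∈ s := by simpa [PySem.Set.contains] using hc
        have hadd : PySem.Set.add s t = s := by
          simp [PySem.Set.add, PySem.Set.contains, ht]
        rw [if_neg (by simp [PySem.Set.contains, ht]), ih s u, hfil, List.foldl_cons, hadd,
          show pvDD s (t :: List.filter (fun t => !(t == "")) l)
              = pvDD s (List.filter (fun t => !(t == "")) l)
            from by rw [pvDD, if_pos hc]]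
      · have hne : t ≠ "" := by simpa using h0
        have hts : t ∉ s := by simpa [PySem.Set.contains] using hc
        rw [if_pos (by simp [hne, PySem.Set.contains, hts]), ih (PySem.Set.add s t) (u ++ [t]), hfil, List.foldl_cons,
          show pvDD s (t :: List.filter (fun t => !(t == "")) l)
              = t :: pvDD (PySem.Set.add s t) (List.filter (fun t => !(t == "")) l)
            from by rw [pvDD, if_neg hc]]
        simp

-- B's reverse-scan loop in closed form
theorem pv_B_fold (pr : String → Bool) (l : List String) (s : PySem.Set String) (u : List String) :
    l.foldl (fun (p : PySem.Set String × List String) t =>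
      if !(PySem.Set.contains p.1 t) then
        (PySem.Set.add p.1 t, if pr t then p.2 ++ [t] else p.2)
      else p) (s, u)
    = (l.foldl PySem.Set.add s, u ++ (pvDD s l).filter pr) := by
  induction l generalizing s u with
  | nil => simp [pvDD]
  | cons t l ih =>
    simp only [List.foldl_cons]
    by_cases hc : PySem.Set.contains s t = true
    · have ht : t ∈ s := by simpa [PySem.Set.contains] using hc
      have hadd : PySem.Set.add s t = s := by
        simp [PySem.Set.add, PySem.Set.contains, ht]
      rw [if_neg (by simp [PySem.Set.contains, ht]), ih s u, hadd,
        show pvDD s (t :: l) = pvDD s l from by rw [pvDD, if_pos hc]]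
    · have hts : t ∉ s := by simpa [PySem.Set.contains] using hc
      rw [if_pos (by simp [PySem.Set.contains, hts]),
        show pvDD s (t :: l) = t :: pvDD (PySem.Set.add s t) l from by rw [pvDD, if_neg hc]]
      by_cases hp : pr t = true
      · rw [if_pos hp, ih (PySem.Set.add s t) (u ++ [t])]
        simp [List.filter_cons, hp]
      · rw [if_neg hp, ih (PySem.Set.add s t) u]
        simp [List.filter_cons, hp]

-- the last-wins order_index dictionary, characterised
theorem pv_getD_oidx (order : List String) (t : String) (d0 : Int) :
    ((PySem.List.enumerate order 0).foldl
      (fun d (p : Int × String) => d.insert p.2 p.1) PySem.Dict.empty).getD t d0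
    = if t ∈ order then ((order.length - 1 - order.reverse.idxOf t : Nat) : Int) else d0 := by
  induction order using List.reverseRecOn with
  | nil => simp [PySem.List.enumerate_nil]
  | append_singleton l x ih =>
    rw [PySem.List.enumerate_append, List.foldl_append]
    simp only [PySem.List.enumerate_cons, PySem.List.enumerate_nil, List.foldl_cons,
      List.foldl_nil]
    rw [PySem.Dict.getD_insert]
    by_cases hx : t = x
    · subst hx
      rw [if_pos rfl, if_pos (by simp)]
      simp only [List.reverse_append, List.reverse_cons, List.reverse_nil, List.nil_append,
        List.cons_append, List.idxOf_cons_self]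
      simp
    · rw [if_neg hx, ih]
      have hrev : (l ++ [x]).reverse = x :: l.reverse := by simp
      by_cases hm : t ∈ l
      · rw [if_pos hm, if_pos (by simp [hm]), hrev,
          List.idxOf_cons_ne _ (fun e => hx e.symm)]
        have h1 : List.idxOf t l.reverse < l.length := by
          have := List.idxOf_lt_length_of_mem (l := l.reverse) (by simpa using hm)
          simpa using this
        congr 1
        simp only [List.length_append, List.length_cons, List.length_nil, Nat.succ_eq_add_one]
        omega
      · rw [if_neg hm, if_neg (by simp [hm, hx])]

-- A's composite-key sort is the sort by the lexicographic key
theorem pv_sorted2_eq_sorted_lex (xs : List String) (k1 : String → Int) :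
    PySem.List.sorted2 xs k1 (fun t => t) false
      = PySem.List.sorted xs (fun t => toLex (k1 t, t)) := by
  rw [PySem.List.sorted_eq_foldl_insertBy]
  unfold PySem.List.sorted2
  simp only [Bool.false_eq_true, if_false]
  have hbe : (fun a b : String =>
        decide (k1 a < k1 b) || (!decide (k1 b < k1 a) && decide (a < b)))
      = (fun a b : String => decide (toLex (k1 a, a) < toLex (k1 b, b))) := by
    funext a b
    by_cases h1 : k1 a < k1 b <;> by_cases h2 : k1 b < k1 a <;> by_cases h3 : a < b <;>
      simp [h1, h2, h3, Prod.Lex.lt_iff] <;> omega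
  rw [hbe]

-- main list-level equality
theorem pv_main (tokens order : List String) :
    serialize_pipe_tokens tokens order = serialize_pipe_tokens_alt tokens order := by
  simp only [serialize_pipe_tokens, serialize_pipe_tokens_alt]
  rw [pv_A_fold]
  have hB := pv_B_fold
    (fun t => PySem.Set.contains (PySem.Set.ofList (tokens.filter (fun t => !(t == "")))) t)
    order.reverse PySem.Set.empty []
  dsimp only at hB ⊢
  rw [hB]
  dsimp only
  simp only [List.nil_append]
  rw [pv_ofList_eq_dd]
  rw [pv_sorted2_eq_sorted_lex]
  set F := tokens.filter (fun t => !(t == "")) with hFdef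
  set P := pvDD PySem.Set.empty F with hPdef
  set r := order.reverse with hrdef
  set Q := pvDD PySem.Set.empty r with hQdef
  have hseen : List.foldl PySem.Set.add PySem.Set.empty r = Q := by
    rw [pv_foldl_add_eq_append_dd]; rfl
  rw [hseen]
  -- memberships
  have hmemP : ∀ x, x ∈ P ↔ x ∈ F := by
    intro x; rw [hPdef, pv_mem_dd]; simp [PySem.Set.empty]
  have hmemQ : ∀ x, x ∈ Q ↔ x ∈ order := by
    intro x; rw [hQdef, pv_mem_dd]; simp [PySem.Set.empty, hrdef]
  -- the two pieces
  set prP := fun t => PySem.Set.contains P t with hprdef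
  set known := (Q.filter prP).reverse with hknown
  set U := PySem.List.sorted (PySem.Set.diff P Q) (fun x => x) false with hU
  have hmemKnown : ∀ x, x ∈ known ↔ x ∈ order ∧ x ∈ P := by
    intro x
    rw [hknown, List.mem_reverse, List.mem_filter, hprdef]
    simp [PySem.Set.contains, List.contains_iff_mem, hmemQ x, and_comm]
  have hmemU : ∀ x, x ∈ U ↔ x ∈ P ∧ x ∉ order := by
    intro x
    rw [hU, PySem.List.mem_sorted]
    simp only [PySem.Set.diff, List.mem_filter]
    exact and_congr_right (fun _ => by
      simp [PySem.Set.contains, List.contains_iff_mem, hmemQ x])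
  -- nodup
  have ndP : P.Nodup := pv_nodup_dd F PySem.Set.empty
  have ndKnown : known.Nodup := by
    rw [hknown, List.nodup_reverse]
    exact (pv_nodup_dd r PySem.Set.empty).filter prP
  have ndU : U.Nodup := by
    rw [hU]
    exact ((PySem.List.sorted_perm _ _ _).nodup_iff).2
      ((pv_nodup_dd F PySem.Set.empty).filter _)
  -- the lexicographic key
  set k1 := fun t => (List.foldl (fun d (p : Int × String) => d.insert p.2 p.1)
      PySem.Dict.empty (PySem.List.enumerate order 0)).getD t (order.length : Int) with hk1
  have hK : ∀ t, k1 t = if t ∈ order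
      then ((order.length - 1 - order.reverse.idxOf t : Nat) : Int)
      else (order.length : Int) := fun t => pv_getD_oidx order t _
  have hlt1 : ∀ (x y : Int) (a b : String), x < y → toLex (x, a) < toLex (y, b) := by
    intro x y a b h; rw [Prod.Lex.lt_iff]; exact Or.inl h
  have hlt2 : ∀ (x : Int) (a b : String), a < b → toLex (x, a) < toLex (x, b) := by
    intro x a b h; rw [Prod.Lex.lt_iff]; exact Or.inr ⟨rfl, h⟩
  -- pairwise pieces
  have pwKnown : known.Pairwise (fun a b => r.idxOf b < r.idxOf a) := by
    rw [hknown, List.pairwise_reverse]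
    exact (pv_pairwise_dd r PySem.Set.empty).filter prP
  have pwU : U.Pairwise (fun a b : String => a < b) := by
    have h1 : U.Pairwise (fun a b : String => a ≤ b) := by
      rw [hU]; exact PySem.List.sorted_pairwise _ _
    have h2 : U.Pairwise (fun a b : String => a ≠ b) := ndU
    exact (h1.and h2).imp (fun h => lt_of_le_of_ne h.1 h.2)
  -- assemble
  have hmain : PySem.List.sorted P (fun t => toLex (k1 t, t)) false = known ++ U := by
    apply PySem.List.sorted_eq_of_perm_of_pairwise_lt
    · rw [List.perm_ext_iff_of_nodup
        (List.Nodup.append ndKnown ndU (fun a ha hb => ((hmemU a).1 hb).2 ((hmemKnown a).1 ha).1))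
        ndP]
      intro x
      rw [List.mem_append, hmemKnown x, hmemU x]
      constructor
      · rintro (⟨_, h⟩ | ⟨h, _⟩) <;> exact h
      · intro hx
        by_cases hord : x ∈ order
        · exact Or.inl ⟨hord, hx⟩
        · exact Or.inr ⟨hx, hord⟩
    · rw [List.pairwise_append]
      refine ⟨?_, ?_, ?_⟩
      · refine pwKnown.imp_of_mem ?_
        intro a b ha hb hab
        have haord := ((hmemKnown a).1 ha).1
        have hbord := ((hmemKnown b).1 hb).1
        rw [hK a, hK b, if_pos haord, if_pos hbord]
        apply hlt1
        have h1 : r.idxOf a < order.length := by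
          have := List.idxOf_lt_length_of_mem (l := r) (by rw [hrdef, List.mem_reverse]; exact haord)
          simpa [hrdef] using this
        have h2 : r.idxOf b < order.length := by
          have := List.idxOf_lt_length_of_mem (l := r) (by rw [hrdef, List.mem_reverse]; exact hbord)
          simpa [hrdef] using this
        have goalN : (order.length - 1 - List.idxOf a r : Nat)
            < order.length - 1 - List.idxOf b r := by omega
        rw [hrdef] at goalN
        exact_mod_cast goalN
      · refine pwU.imp_of_mem ?_
        intro a b ha hb hab
        have ha' := ((hmemU a).1 ha).2
        have hb' := ((hmemU b).1 hb).2
        rw [hK a, hK b, if_neg ha', if_neg hb']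
        exact hlt2 _ _ _ hab
      · intro a ha b hb
        have haord := ((hmemKnown a).1 ha).1
        have hb' := ((hmemU b).1 hb).2
        rw [hK a, hK b, if_pos haord, if_neg hb']
        apply hlt1
        have h1 : r.idxOf a < order.length := by
          have := List.idxOf_lt_length_of_mem (l := r) (by rw [hrdef, List.mem_reverse]; exact haord)
          simpa [hrdef] using this
        have goalN : (order.length - 1 - List.idxOf a r : Nat) < order.length := by omega
        rw [hrdef] at goalN
        exact_mod_cast goalN
  exact congrArg (PySem.Str.join "|") hmain

-- ===== VERDICT (by name: the statement is the Claim_ definition above) =====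
theorem serialize_pipe_tokens_spec : Claim_equal_serialize_pipe_tokens := by
  intro tokens order _
  unfold Spec_serialize_pipe_tokens
  exact pv_main tokens order
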